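-- pv_equiv track=rewrite | github.com/faraonc/Data-Analysis-Automation-Sprint-Internship | market_summary.py | getTestTypeHeader
-- ===== SOURCE A (Python) =====
-- def getTestTypeHeader(paths):
-- 	header = []
-- 	for path in paths:
-- 		if "all" in path.lower():
-- 			header.append("All Tests")
-- 		elif "uplink" in path.lower():
-- 			header.append("Uplink Throughput Tests")
-- 		elif "downlink" in path.lower():
-- 			header.append("Downlink Throughput Tests")
-- 		elif "secure" in path.lower():
-- 			header.append("Lite Data Secure Tests")
-- 		elif "lite_data" in path.lower():
-- 			header.append("Lite Data Tests")
-- 	return header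
-- ===== SOURCE B (Python) =====
-- # Inverted loop nesting: keywords outer (in reverse priority), overwriting a
-- # per-path label slot; higher-priority keywords overwrite later, so the final
-- # slot equals A's first-match label.  Unmatched slots are filtered out.
-- _REV_TABLE = (
--     ("lite_data", "Lite Data Tests"),
--     ("secure", "Lite Data Secure Tests"),
--     ("downlink", "Downlink Throughput Tests"),
--     ("uplink", "Uplink Throughput Tests"),
--     ("all", "All Tests"),
-- )
--
-- def getTestTypeHeader(paths):
--     lows = [p.lower() for p in paths]
--     labels = [None] * len(lows)
--     for kw, lab in _REV_TABLE:
--         for i, low in enumerate(lows):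
--             if kw in low:
--                 labels[i] = lab
--     return [lab for lab in labels if lab is not None]
-- ===== Notes on version B (the rewrite author's own statement) =====
-- stated objective: alternative
-- what changed: Inverts the loop nesting: instead of an if/elif chain per path, B iterates keywords in reverse priority order over a per-path label-slot array, later (higher-priority) keywords overwriting earlier ones, and finally filters out empty slots.
import Mathlib
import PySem

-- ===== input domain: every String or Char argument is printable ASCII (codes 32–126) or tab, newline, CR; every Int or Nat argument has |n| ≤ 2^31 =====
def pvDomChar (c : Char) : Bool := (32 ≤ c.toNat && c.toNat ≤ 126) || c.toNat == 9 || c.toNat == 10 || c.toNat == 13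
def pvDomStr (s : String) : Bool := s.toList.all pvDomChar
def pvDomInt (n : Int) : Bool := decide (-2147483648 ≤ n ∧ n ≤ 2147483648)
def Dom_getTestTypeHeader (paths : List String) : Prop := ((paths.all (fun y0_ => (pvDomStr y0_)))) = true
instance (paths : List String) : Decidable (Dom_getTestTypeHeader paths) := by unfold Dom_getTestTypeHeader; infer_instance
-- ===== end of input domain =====

-- B inverts A's loop nesting: keywords outer in reverse priority overwriting per-path label
-- slots, then filtering empty slots (alternative decomposition, same cost).


-- ===== PORT A =====
-- literal transliteration: for each path, the if/elif chain appends at most one label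
def getTestTypeHeader (paths : List String) : List String :=
  paths.foldl
    (fun header path =>
      if PySem.Str.isIn "all" (PySem.Str.lower path) then header ++ ["All Tests"]
      else if PySem.Str.isIn "uplink" (PySem.Str.lower path) then header ++ ["Uplink Throughput Tests"]
      else if PySem.Str.isIn "downlink" (PySem.Str.lower path) then header ++ ["Downlink Throughput Tests"]
      else if PySem.Str.isIn "secure" (PySem.Str.lower path) then header ++ ["Lite Data Secure Tests"]
      else if PySem.Str.isIn "lite_data" (PySem.Str.lower path) then header ++ ["Lite Data Tests"]
      else header)
    []

-- ===== PORT B =====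
-- the keyword→label table in REVERSE priority order (later entries overwrite)
def pvRevTable : List (String × String) :=
  [("lite_data", "Lite Data Tests"),
   ("secure", "Lite Data Secure Tests"),
   ("downlink", "Downlink Throughput Tests"),
   ("uplink", "Uplink Throughput Tests"),
   ("all", "All Tests")]

-- one outer-loop step: overwrite the slot of every path containing kw
-- (labels[i] updated alongside lows[i]; ported as a map over the zip)
def getTestTypeHeader_alt (paths : List String) : List String :=
  let lows := paths.map PySem.Str.lower
  let labels := pvRevTable.foldl
    (fun (labels : List (Option String)) (p : String × String) =>
      (labels.zip lows).map (fun q => if PySem.Str.isIn p.1 q.2 then some p.2 else q.1))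
    (lows.map (fun _ => (none : Option String)))
  labels.filterMap id

-- ===== PRECONDITION & SPEC =====
def Spec_getTestTypeHeader (paths : List String) (out : List String) : Prop := out = getTestTypeHeader_alt paths
instance (paths : List String) (out : List String) : Decidable (Spec_getTestTypeHeader paths out) := by unfold Spec_getTestTypeHeader; infer_instance

-- ===== CLAIM (what is proved, stated in full; the proofs are below) =====
def Claim_equal_getTestTypeHeader : Prop := ∀ (paths : List String), Dom_getTestTypeHeader paths → Spec_getTestTypeHeader paths (getTestTypeHeader paths)

-- ===== LEMMAS AND PROOFS =====

-- the per-path result of the table fold, one slot at a time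
def pvSlot (t : List (String × String)) (low : String) (o : Option String) : Option String :=
  t.foldl (fun o p => if PySem.Str.isIn p.1 low then some p.2 else o) o

-- B's elementwise fold over the whole table commutes with mapping per element
theorem pvFold_pointwise (t : List (String × String)) (lows : List String)
    (g : String → Option String) :
    t.foldl
      (fun (labels : List (Option String)) (p : String × String) =>
        (labels.zip lows).map (fun q => if PySem.Str.isIn p.1 q.2 then some p.2 else q.1))
      (lows.map g)
    = lows.map (fun low => pvSlot t low (g low)) := by
  induction t generalizing g with
  | nil => simp [pvSlot]
  | cons p rest ih =>
    have hz : ∀ (ls : List String), (ls.map g).zip ls = ls.map (fun l => (g l, l)) := by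
      intro ls
      induction ls with
      | nil => rfl
      | cons a tl ih2 => simp [ih2]
    rw [List.foldl_cons, hz lows, List.map_map,
        show ((fun q : Option String × String =>
            if PySem.Str.isIn p.1 q.2 then some p.2 else q.1) ∘ fun l => (g l, l))
          = fun l => if PySem.Str.isIn p.1 l then some p.2 else g l from rfl,
        ih]
    simp [pvSlot]

-- the reversed-table last-write-wins slot equals A's forward first-match if/elif chain
theorem pvSlot_rev (low : String) :
    pvSlot pvRevTable low none
    = (if PySem.Str.isIn "all" low then some "All Tests"
       else if PySem.Str.isIn "uplink" low then some "Uplink Throughput Tests"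
       else if PySem.Str.isIn "downlink" low then some "Downlink Throughput Tests"
       else if PySem.Str.isIn "secure" low then some "Lite Data Secure Tests"
       else if PySem.Str.isIn "lite_data" low then some "Lite Data Tests"
       else none) := by
  simp only [pvSlot, pvRevTable, List.foldl_cons, List.foldl_nil]

-- A's fold appends, per path, exactly the option pvSlot computes
theorem pvA_fold (paths : List String) (acc : List String) :
    paths.foldl
      (fun header path =>
        if PySem.Str.isIn "all" (PySem.Str.lower path) then header ++ ["All Tests"]
        else if PySem.Str.isIn "uplink" (PySem.Str.lower path) then header ++ ["Uplink Throughput Tests"]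
        else if PySem.Str.isIn "downlink" (PySem.Str.lower path) then header ++ ["Downlink Throughput Tests"]
        else if PySem.Str.isIn "secure" (PySem.Str.lower path) then header ++ ["Lite Data Secure Tests"]
        else if PySem.Str.isIn "lite_data" (PySem.Str.lower path) then header ++ ["Lite Data Tests"]
        else header)
      acc
    = acc ++ paths.filterMap (fun p => pvSlot pvRevTable (PySem.Str.lower p) none) := by
  induction paths generalizing acc with
  | nil => simp
  | cons p rest ih =>
    rw [List.foldl_cons, ih, List.filterMap_cons, pvSlot_rev (PySem.Str.lower p)]
    split_ifs <;> simp

-- ===== VERDICT (by name: the statement is the Claim_ definition above) =====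
theorem getTestTypeHeader_spec : Claim_equal_getTestTypeHeader := by
  intro paths _
  show getTestTypeHeader paths = getTestTypeHeader_alt paths
  rw [getTestTypeHeader, getTestTypeHeader_alt, pvA_fold paths []]
  rw [pvFold_pointwise pvRevTable (paths.map PySem.Str.lower) (fun _ => none)]
  rw [List.nil_append, List.filterMap_map, List.filterMap_map]
  rfl
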